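-- pv_equiv track=rewrite | github.com/DanielAlejandro2605/git-galaxy | services/api/src/modules/vectorizer.py | _chunk_js_code
-- ===== SOURCE A (Python) =====
-- from typing import Dict, List, Any, Tuple
--
-- def _chunk_js_code(content: str) -> List[str]:
--     """Chunk JavaScript/TypeScript code by functions, classes, and imports"""
--     chunks = []
--     lines = content.split('\n')
--     current_chunk = []
--
--     for line in lines:
--         stripped = line.strip()
--
--         # Start new chunk for imports, functions, classes
--         if (stripped.startswith(('import ', 'export ')) or
--             stripped.startswith('function ') or
--             stripped.startswith('const ') or
--             stripped.startswith('let ') or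
--             stripped.startswith('var ') or
--             stripped.startswith('class ') or
--             '=>' in stripped):  # Arrow functions
--
--             if current_chunk:
--                 chunks.append('\n'.join(current_chunk))
--             current_chunk = [line]
--         else:
--             current_chunk.append(line)
--
--     if current_chunk:
--         chunks.append('\n'.join(current_chunk))
--
--     return chunks
-- ===== SOURCE B (Python) =====
-- from typing import List
--
-- def _chunk_js_code(content: str) -> List[str]:
--     """Chunk JS/TS code: structural recursion emitting chunks front-to-back (no running accumulator)."""
--     def _is_boundary(stripped: str) -> bool:
--         return (stripped.startswith(('import ', 'export ')) or
--                 stripped.startswith('function ') or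
--                 stripped.startswith('const ') or
--                 stripped.startswith('let ') or
--                 stripped.startswith('var ') or
--                 stripped.startswith('class ') or
--                 '=>' in stripped)
--
--     def _chunks_of(lines: List[str]) -> List[str]:
--         if not lines:
--             return []
--         head, tail = lines[0], lines[1:]
--         body = []
--         while tail and not _is_boundary(tail[0].strip()):
--             body.append(tail[0])
--             tail = tail[1:]
--         return ['\n'.join([head] + body)] + _chunks_of(tail)
--
--     return _chunks_of(content.split('\n'))
-- ===== Notes on version B (the rewrite author's own statement) =====
-- stated objective: alternative
-- what changed: Replaces A's single pass with a running current_chunk accumulator (flushed at each boundary line) by a structural recursion that emits each chunk front-to-back: take the head line, span off the following non-boundary lines as the body, join, and recurse on the rest.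
import Mathlib
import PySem

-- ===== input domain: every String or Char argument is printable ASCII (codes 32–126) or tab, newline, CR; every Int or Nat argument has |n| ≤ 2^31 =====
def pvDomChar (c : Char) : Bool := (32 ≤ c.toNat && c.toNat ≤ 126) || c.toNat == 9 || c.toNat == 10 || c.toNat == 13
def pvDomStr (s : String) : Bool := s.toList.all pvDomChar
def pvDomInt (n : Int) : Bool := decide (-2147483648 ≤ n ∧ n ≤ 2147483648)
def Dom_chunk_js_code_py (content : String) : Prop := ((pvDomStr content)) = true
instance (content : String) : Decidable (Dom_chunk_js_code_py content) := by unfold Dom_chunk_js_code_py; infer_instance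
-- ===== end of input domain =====

-- B replaces A's running-accumulator fold with a structural recursion that emits each
-- chunk front-to-back (head line + span of non-boundary lines); objective: alternative.

-- content.split('\n'): sep is the nonempty literal "\n", so split? is always `some`; getD is exact here
def splitLines (content : String) : List String :=
  (PySem.Str.split? content "\n").getD []

-- ===== PORT A =====
-- the fold step of A's for-loop (state = (chunks, current_chunk))
def chunkStepA (st : List String × List String) (line : String) : List String × List String :=
  let stripped := PySem.Str.strip line
  if PySem.Str.startswith stripped "import " || PySem.Str.startswith stripped "export "
     || PySem.Str.startswith stripped "function " || PySem.Str.startswith stripped "const "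
     || PySem.Str.startswith stripped "let " || PySem.Str.startswith stripped "var "
     || PySem.Str.startswith stripped "class " || PySem.Str.isIn "=>" stripped then
    ((if st.2.isEmpty then st.1 else st.1 ++ [PySem.Str.join "\n" st.2]), [line])
  else
    (st.1, st.2 ++ [line])

def chunk_js_code_py (content : String) : List String :=
  let lines := splitLines content
  let st := lines.foldl chunkStepA ([], [])
  if st.2.isEmpty then st.1 else st.1 ++ [PySem.Str.join "\n" st.2]

-- ===== PORT B =====
def isBoundaryB (stripped : String) : Bool :=
  PySem.Str.startswith stripped "import " || PySem.Str.startswith stripped "export "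
  || PySem.Str.startswith stripped "function " || PySem.Str.startswith stripped "const "
  || PySem.Str.startswith stripped "let " || PySem.Str.startswith stripped "var "
  || PySem.Str.startswith stripped "class " || PySem.Str.isIn "=>" stripped

-- the inner while loop of B: collect the body (non-boundary lines) and the remaining tail
def spanB : List String → List String × List String
  | [] => ([], [])
  | l :: rest =>
      if isBoundaryB (PySem.Str.strip l) then ([], l :: rest)
      else
        let p := spanB rest
        (l :: p.1, p.2)

theorem spanB_snd_length_le (xs : List String) : (spanB xs).2.length ≤ xs.length := by
  induction xs with
  | nil => simp [spanB]
  | cons l rest ih =>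
      simp only [spanB]
      split
      · simp
      · simpa using Nat.le_succ_of_le ih

def chunksOfB : List String → List String
  | [] => []
  | head :: tail =>
      PySem.Str.join "\n" (head :: (spanB tail).1) :: chunksOfB (spanB tail).2
termination_by lines => lines.length
decreasing_by
  simpa using Nat.lt_succ_of_le (spanB_snd_length_le tail)

def chunk_js_code_py_alt (content : String) : List String :=
  chunksOfB (splitLines content)

-- ===== PRECONDITION & SPEC =====
def Spec_chunk_js_code_py (content : String) (out : List String) : Prop := out = chunk_js_code_py_alt content
instance (content : String) (out : List String) : Decidable (Spec_chunk_js_code_py content out) := by unfold Spec_chunk_js_code_py; infer_instance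

-- ===== CLAIM (what is proved, stated in full; the proofs are below) =====
def Claim_equal_chunk_js_code_py : Prop := ∀ (content : String), Dom_chunk_js_code_py content → Spec_chunk_js_code_py content (chunk_js_code_py content)

-- ===== LEMMAS AND PROOFS =====

-- the post-loop flush of A, as a function of the loop state
def finishA (st : List String × List String) : List String :=
  if st.2.isEmpty then st.1 else st.1 ++ [PySem.Str.join "\n" st.2]

theorem chunksOfB_cons (head : String) (tail : List String) :
    chunksOfB (head :: tail) =
      PySem.Str.join "\n" (head :: (spanB tail).1) :: chunksOfB (spanB tail).2 := by
  rw [chunksOfB.eq_def]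

-- A's loop from a nonempty current chunk: the pending chunk absorbs spanB's body,
-- then the remaining tail is chunked exactly as B does.
theorem foldl_chunkStepA (xs : List String) (chunks cur : List String) (h : cur ≠ []) :
    finishA (xs.foldl chunkStepA (chunks, cur)) =
    chunks ++ (PySem.Str.join "\n" (cur ++ (spanB xs).1) :: chunksOfB (spanB xs).2) := by
  induction xs generalizing chunks cur with
  | nil =>
      simp [spanB, chunksOfB, finishA, List.isEmpty_iff, h]
  | cons x xs ih =>
      simp only [List.foldl_cons]
      by_cases hb : isBoundaryB (PySem.Str.strip x) = true
      · have hstep : chunkStepA (chunks, cur) x =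
            (chunks ++ [PySem.Str.join "\n" cur], [x]) := by
          simp only [chunkStepA, isBoundaryB] at hb ⊢
          simp only [hb, if_pos]
          simp [List.isEmpty_iff, h]
        rw [hstep, ih _ [x] (by simp)]
        conv_rhs => rw [spanB.eq_def]
        simp only [hb, if_pos]
        rw [chunksOfB_cons]
        simp
      · have hstep : chunkStepA (chunks, cur) x = (chunks, cur ++ [x]) := by
          simp only [chunkStepA, isBoundaryB] at hb ⊢
          simp only [hb, Bool.false_eq_true, if_neg, not_false_iff]
        rw [hstep, ih _ (cur ++ [x]) (by simp)]
        conv_rhs => rw [spanB.eq_def]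
        simp only [hb, Bool.false_eq_true, if_neg, not_false_iff]
        simp

theorem chunk_eq_chunksOfB (lines : List String) :
    finishA (lines.foldl chunkStepA ([], [])) = chunksOfB lines := by
  cases lines with
  | nil => simp [chunksOfB, finishA]
  | cons l ls =>
      have hstep : chunkStepA ([], []) l = ([], [l]) := by
        simp only [chunkStepA]
        split <;> simp
      simp only [List.foldl_cons, hstep]
      rw [foldl_chunkStepA ls [] [l] (by simp)]
      rw [chunksOfB_cons]
      simp

-- ===== VERDICT (by name: the statement is the Claim_ definition above) =====
theorem chunk_js_code_py_spec : Claim_equal_chunk_js_code_py := by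
  intro content _
  unfold Spec_chunk_js_code_py chunk_js_code_py chunk_js_code_py_alt
  exact chunk_eq_chunksOfB (splitLines content)
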